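-- pv_equiv track=rewrite | github.com/alading-2/War3ExcelTool-Open | .history/src/core/get_string_color_20250401164725.py | format_with_color_codes
-- ===== SOURCE A (Python) =====
-- def format_with_color_codes(colors_data):
--     """
--     将颜色数据格式化为带有颜色代码的字符串
--
--     Args:
--         colors_data (list): 包含文本和颜色信息的列表，格式为[(text, color_rgb), ...]
--
--     Returns:
--         str: 格式化后的字符串，如 "aa|cffff0000bb|r|cff00ff00cc|rdd"
--     """
--     if not colors_data:
--         return ""
--
--     result = []
--     current_color = None
--     current_text = ""
--
--     for text, color in colors_data:
--         if color != current_color: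
--             # 如果有累积的文本，先添加到结果中
--             if current_text:
--                 if current_color:
--                     # 转换颜色格式：FFRRGGBB -> |cffRRGGBB|r
--                     color_code = f"|cff{current_color[2:]}"
--                     result.append(f"{color_code}{current_text}|r")
--                 else:
--                     result.append(current_text)
--                 current_text = ""
--             current_color = color
--
--         current_text += text
--
--     # 处理最后一段文本
--     if current_text:
--         if current_color:
--             color_code = f"|cff{current_color[2:]}"
--             result.append(f"{color_code}{current_text}|r")
--         else:
--             result.append(current_text)
--
--     return "".join(result)
-- ===== SOURCE B (Python) =====
-- def format_with_color_codes(colors_data):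
--     # Build maximal consecutive same-color runs, then render them in one pass.
--     runs = []  # [[color, joined_text], ...]
--     for text, color in colors_data:
--         if runs and runs[-1][0] == color:
--             runs[-1][1] += text
--         else:
--             runs.append([color, text])
--     return "".join(
--         f"|cff{color[2:]}{text}|r" if color else text
--         for color, text in runs
--         if text
--     )
-- ===== Notes on version B (the rewrite author's own statement) =====
-- stated objective: simpler
-- what changed: Replaces A's three-variable flush-on-color-change state machine (with duplicated flush code) by first building the list of maximal consecutive same-color runs and then rendering all runs in a single join over a comprehension.
import Mathlib
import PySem

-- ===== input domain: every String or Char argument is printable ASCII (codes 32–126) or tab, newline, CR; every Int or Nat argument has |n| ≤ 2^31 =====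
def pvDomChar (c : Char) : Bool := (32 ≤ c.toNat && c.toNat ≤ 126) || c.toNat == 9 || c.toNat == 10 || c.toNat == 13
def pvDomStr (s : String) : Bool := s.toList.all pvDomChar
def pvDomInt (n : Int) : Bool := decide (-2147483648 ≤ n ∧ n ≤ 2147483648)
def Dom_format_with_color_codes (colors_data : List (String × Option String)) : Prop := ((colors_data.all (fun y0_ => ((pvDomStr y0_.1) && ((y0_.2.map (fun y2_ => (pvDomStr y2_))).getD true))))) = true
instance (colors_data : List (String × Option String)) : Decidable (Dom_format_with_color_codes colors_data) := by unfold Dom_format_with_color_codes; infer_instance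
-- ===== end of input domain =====

-- B restructures A (run-list then render) rather than A's flush-on-change state machine; same output, proved equal.

-- ===== PORT A =====
-- Python truthiness of `color` / `current_color` (None and "" are falsy)
def pvTruthyA : Option String → Bool
  | none => false
  | some c => c ≠ ""

-- the duplicated flush code of A: emit one accumulated segment
def pvEmitA (cc : Option String) (ct : String) : String :=
  if pvTruthyA cc then
    ("|cff" ++ PySem.Str.slice (cc.getD "") (some 2) none) ++ ct ++ "|r"
  else ct

-- A's loop over (text, color) with state (result, current_color, current_text), plus the final flush
def pvLoopA (res : List String) (cc : Option String) (ct : String) :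
    List (String × Option String) → List String
  | [] => if ct ≠ "" then res ++ [pvEmitA cc ct] else res
  | (t, c) :: rest =>
      if c ≠ cc then
        pvLoopA (if ct ≠ "" then res ++ [pvEmitA cc ct] else res) c ("" ++ t) rest
      else
        pvLoopA res cc (ct ++ t) rest

def format_with_color_codes (colors_data : List (String × Option String)) : String :=
  if colors_data = [] then ""
  else (pvLoopA [] none "" colors_data).foldl (· ++ ·) ""

-- ===== PORT B =====
def pvEmitB (c : Option String) (t : String) : String :=
  if pvTruthyA c then
    ("|cff" ++ PySem.Str.slice (c.getD "") (some 2) none) ++ t ++ "|r"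
  else t

-- B's run builder: current run (c, acc) carried as accumulator (= mutating runs[-1])
def pvRuns (c : Option String) (acc : String) :
    List (String × Option String) → List (Option String × String)
  | [] => [(c, acc)]
  | (t, c') :: rest =>
      if c' = c then pvRuns c (acc ++ t) rest
      else (c, acc) :: pvRuns c' t rest

def format_with_color_codes_alt (colors_data : List (String × Option String)) : String :=
  match colors_data with
  | [] => ""
  | (t, c) :: rest =>
      ((pvRuns c t rest).filterMap
        (fun g => if g.2 ≠ "" then some (pvEmitB g.1 g.2) else none)).foldl (· ++ ·) ""

-- ===== PRECONDITION & SPEC =====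
def Spec_format_with_color_codes (colors_data : List (String × Option String)) (out : String) : Prop := out = format_with_color_codes_alt colors_data
instance (colors_data : List (String × Option String)) (out : String) : Decidable (Spec_format_with_color_codes colors_data out) := by unfold Spec_format_with_color_codes; infer_instance

-- ===== CLAIM (what is proved, stated in full; the proofs are below) =====
def Claim_equal_format_with_color_codes : Prop := ∀ (colors_data : List (String × Option String)), Dom_format_with_color_codes colors_data → Spec_format_with_color_codes colors_data (format_with_color_codes colors_data)

-- ===== LEMMAS AND PROOFS =====

-- render a run list the way B does
def pvRend (gs : List (Option String × String)) : String :=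
  (gs.filterMap (fun g => if g.2 ≠ "" then some (pvEmitB g.1 g.2) else none)).foldl (· ++ ·) ""

lemma pvEmit_eq : pvEmitA = pvEmitB := rfl

lemma str_foldl_append (l : List String) : ∀ a b : String,
    l.foldl (· ++ ·) (a ++ b) = a ++ l.foldl (· ++ ·) b := by
  induction l with
  | nil => intro a b; rfl
  | cons x xs ih =>
    intro a b
    simp only [List.foldl_cons, String.append_assoc, ih]

lemma str_foldl_empty (l : List String) (a : String) :
    l.foldl (· ++ ·) a = a ++ l.foldl (· ++ ·) "" := by
  have h := str_foldl_append l a ""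
  simpa using h

lemma pvRend_cons_ne (c : Option String) (ct : String) (gs : List (Option String × String))
    (h : ct ≠ "") : pvRend ((c, ct) :: gs) = pvEmitB c ct ++ pvRend gs := by
  unfold pvRend
  simp only [List.filterMap_cons, h, ne_eq, not_false_eq_true, if_pos, List.foldl_cons]
  simp only [show ("" : String) ++ pvEmitB c ct = pvEmitB c ct from by simp]
  exact str_foldl_empty _ _

lemma pvRend_cons_empty (c : Option String) (gs : List (Option String × String)) :
    pvRend ((c, "") :: gs) = pvRend gs := by
  unfold pvRend
  simp

lemma foldl_snoc (res : List String) (x : String) :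
    (res ++ [x]).foldl (· ++ ·) "" = res.foldl (· ++ ·) "" ++ x := by
  simp [List.foldl_append]

lemma pvLoopA_eq : ∀ (l : List (String × Option String)) (res : List String)
    (cc : Option String) (ct : String),
    (pvLoopA res cc ct l).foldl (· ++ ·) "" =
      res.foldl (· ++ ·) "" ++ pvRend (pvRuns cc ct l) := by
  intro l
  induction l with
  | nil =>
    intro res cc ct
    by_cases h : ct = ""
    · subst h
      simp [pvLoopA, pvRuns, pvRend_cons_empty, show pvRend [] = "" from rfl]
    · rw [show pvLoopA res cc ct [] = res ++ [pvEmitA cc ct] from by simp [pvLoopA, h],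
        show pvRuns cc ct [] = [(cc, ct)] from rfl,
        pvRend_cons_ne _ _ _ h, foldl_snoc, pvEmit_eq]
      simp [show pvRend [] = "" from rfl]
  | cons p rest ih =>
    obtain ⟨t, c⟩ := p
    intro res cc ct
    by_cases hc : c = cc
    · rw [show pvLoopA res cc ct ((t, c) :: rest) = pvLoopA res cc (ct ++ t) rest
          from by simp [pvLoopA, hc],
        show pvRuns cc ct ((t, c) :: rest) = pvRuns cc (ct ++ t) rest
          from by simp [pvRuns, hc],
        ih]
    · rw [show pvLoopA res cc ct ((t, c) :: rest)
          = pvLoopA (if ct ≠ "" then res ++ [pvEmitA cc ct] else res) c ("" ++ t) rest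
          from by simp [pvLoopA, hc],
        show pvRuns cc ct ((t, c) :: rest) = (cc, ct) :: pvRuns c t rest
          from by simp [pvRuns, hc],
        show ("" : String) ++ t = t from by simp,
        ih]
      by_cases h : ct = ""
      · subst h
        rw [pvRend_cons_empty]
        simp
      · rw [if_pos h, pvRend_cons_ne _ _ _ h, foldl_snoc, pvEmit_eq,
          String.append_assoc]

-- ===== VERDICT (by name: the statement is the Claim_ definition above) =====
theorem format_with_color_codes_spec : Claim_equal_format_with_color_codes := by
  intro colors_data _
  unfold Spec_format_with_color_codes
  match colors_data with
  | [] => rfl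
  | (t, c) :: rest =>
    show (pvLoopA [] none "" ((t, c) :: rest)).foldl (· ++ ·) "" = _
    rw [pvLoopA_eq]
    have hB : format_with_color_codes_alt ((t, c) :: rest) = pvRend (pvRuns c t rest) := rfl
    rw [hB]
    by_cases hc : c = none
    · subst hc
      rw [show pvRuns none "" ((t, none) :: rest) = pvRuns none ("" ++ t) rest from by
            simp [pvRuns]]
      simp
    · rw [show pvRuns none "" ((t, c) :: rest) = (none, "") :: pvRuns c t rest from by
            simp [pvRuns, hc],
        pvRend_cons_empty]
      simp
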